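-- pv_equiv track=rewrite | github.com/AngelaWebbDev/Various_Algorithms | python.py | skylineHeights
-- ===== SOURCE A (Python) =====
-- def skylineHeights(arr):
--     tallest = 0
--     visible = []
--     for building in arr:
--         if(building>tallest):
--             tallest = building
--             visible.append(building)
--     return visible
-- ===== SOURCE B (Python) =====
-- def skylineHeights(arr):
--     # Right-to-left monotonic stack: scan the buildings from the far end,
--     # popping every stacked building not taller than the current one, and
--     # push the current building when it clears the ground level 0.  The
--     # stack then holds the visible buildings in reverse order.
--     stack = []
--     for h in reversed(arr):
--         while stack and stack[-1] <= h:
--             stack.pop()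
--         if h > 0:
--             stack.append(h)
--     return stack[::-1]
-- ===== Notes on version B (the rewrite author's own statement) =====
-- stated objective: alternative
-- what changed: Replaces the left-to-right loop threading a scalar running max with a right-to-left monotonic-stack scan: each building pops the stacked buildings it overtops, is pushed when it clears 0, and the reversed stack is the answer.
import Mathlib
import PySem

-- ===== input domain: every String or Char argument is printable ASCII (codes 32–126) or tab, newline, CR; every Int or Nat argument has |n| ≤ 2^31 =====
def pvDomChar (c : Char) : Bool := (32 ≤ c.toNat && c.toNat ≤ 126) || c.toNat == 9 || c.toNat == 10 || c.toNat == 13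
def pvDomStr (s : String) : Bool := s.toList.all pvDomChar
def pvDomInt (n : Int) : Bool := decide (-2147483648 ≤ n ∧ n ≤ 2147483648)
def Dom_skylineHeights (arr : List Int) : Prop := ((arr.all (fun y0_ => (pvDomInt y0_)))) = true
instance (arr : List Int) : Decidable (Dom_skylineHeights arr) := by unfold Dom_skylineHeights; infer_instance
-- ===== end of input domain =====

-- B replaces A's left-to-right loop with a scalar running max by a right-to-left
-- monotonic-stack scan (pop not-taller buildings, push when above 0, reverse the stack).

-- ===== PORT A =====
-- literal port of A: fold over arr with state (tallest, visible); skyStep is the loop body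
def skyStep (s : Int × List Int) (building : Int) : Int × List Int :=
  if building > s.1 then (building, s.2 ++ [building]) else s

def skylineHeights (arr : List Int) : List Int :=
  (arr.foldl skyStep (0, [])).2

-- ===== PORT B =====
-- literal port of B: the Lean list holds Python's stack REVERSED (head = top of stack),
-- so Python's while-pop from the end is dropWhile at the head, append is cons, and the
-- final stack[::-1] is the Lean list itself.
def skyPush (stack : List Int) (h : Int) : List Int :=
  let stack := stack.dropWhile (fun b => b ≤ h)   -- while stack and stack[-1] <= h: pop
  if h > 0 then h :: stack else stack             -- if h > 0: stack.append(h)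

def skylineHeights_alt (arr : List Int) : List Int :=
  arr.reverse.foldl skyPush []                    -- for h in reversed(arr); return stack[::-1]

-- ===== PRECONDITION & SPEC =====
def Spec_skylineHeights (arr : List Int) (out : List Int) : Prop := out = skylineHeights_alt arr
instance (arr : List Int) (out : List Int) : Decidable (Spec_skylineHeights arr out) := by unfold Spec_skylineHeights; infer_instance

-- ===== CLAIM (what is proved, stated in full; the proofs are below) =====
def Claim_equal_skylineHeights : Prop := ∀ (arr : List Int), Dom_skylineHeights arr → Spec_skylineHeights arr (skylineHeights arr)

-- ===== LEMMAS AND PROOFS =====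
-- proof-side recursive characterisation of the visible list
def skyRec : List Int → List Int
  | [] => []
  | h :: t => (if h > 0 then [h] else []) ++ (skyRec t).filter (fun b => b > h)

-- every element skyRec produces is positive
theorem skyRec_pos (l : List Int) : ∀ b ∈ skyRec l, 0 < b := by
  induction l with
  | nil => simp [skyRec]
  | cons a l ih =>
    intro b hb
    simp only [skyRec, List.mem_append, List.mem_filter] at hb
    rcases hb with hb | ⟨hb, _⟩
    · split at hb <;> simp_all
    · exact ih b hb

-- skyRec is strictly increasing
theorem skyRec_sorted (l : List Int) : (skyRec l).Pairwise (· < ·) := by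
  induction l with
  | nil => simp [skyRec]
  | cons a l ih =>
    have hf : ((skyRec l).filter (fun b => b > a)).Pairwise (· < ·) := ih.filter _
    by_cases h : a > 0
    · simp only [skyRec, if_pos h, List.singleton_append, List.pairwise_cons]
      refine ⟨fun b hb => ?_, hf⟩
      have := (List.mem_filter.mp hb).2
      simpa using this
    · simpa [skyRec, if_neg h] using hf


-- on a strictly increasing list, dropWhile (· ≤ h) is filter (· > h)
theorem dropWhile_eq_filter (h : Int) (l : List Int) (hs : l.Pairwise (· < ·)) :
    l.dropWhile (fun b => b ≤ h) = l.filter (fun b => b > h) := by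
  induction l with
  | nil => simp
  | cons a l ih =>
    rcases List.pairwise_cons.mp hs with ⟨ha, hl⟩
    by_cases hc : a ≤ h
    · rw [List.dropWhile_cons_of_pos (by simpa using hc), ih hl]
      have : (l.filter (fun b => b > h)) = l.filter (fun b => b > h) := rfl
      simp [show ¬ (a > h) by omega]
    · have hgt : a > h := by omega
      rw [List.dropWhile_cons_of_neg (by simpa using hc)]
      have : l.filter (fun b => b > h) = l := by
        apply List.filter_eq_self.mpr
        intro b hb
        have := ha b hb
        simp; omega
      simp [hgt, this]

-- B's fold computes skyRec
theorem alt_eq_skyRec (arr : List Int) : skylineHeights_alt arr = skyRec arr := by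
  unfold skylineHeights_alt
  rw [List.foldl_reverse]
  induction arr with
  | nil => simp [skyRec]
  | cons a l ih =>
    show skyPush (List.foldr (fun x y => skyPush y x) [] l) a = skyRec (a :: l)
    rw [ih]
    simp only [skyPush, skyRec]
    rw [dropWhile_eq_filter a (skyRec l) (skyRec_sorted l)]
    by_cases h : a > 0 <;> simp [h]

-- the accumulator factors out of A's loop
theorem sky_acc (l : List Int) : ∀ (t : Int) (acc : List Int),
    (l.foldl skyStep (t, acc)).2 = acc ++ (l.foldl skyStep (t, [])).2 := by
  induction l with
  | nil => simp
  | cons a l ih =>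
    intro t acc
    simp only [List.foldl_cons, skyStep]
    by_cases h : a > t
    · simp [h, ih a (acc ++ [a]), ih a [a]]
    · simp only [if_neg h]; exact ih t acc

-- A's loop from threshold t ≥ 0 is skyRec filtered by > t
theorem sky_main (l : List Int) : ∀ (t : Int), 0 ≤ t →
    (l.foldl skyStep (t, [])).2 = (skyRec l).filter (fun b => b > t) := by
  induction l with
  | nil => simp [skyRec]
  | cons a l ih =>
    intro t ht
    simp only [List.foldl_cons, skyStep, skyRec, List.filter_append, List.filter_filter]
    by_cases h : a > t
    · have ha : (0:Int) < a := by omega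
      rw [if_pos h]
      simp only [List.nil_append]
      rw [sky_acc l a [a], ih a (le_of_lt ha), if_pos ha]
      have : (skyRec l).filter (fun b => decide (b > t) && decide (b > a))
           = (skyRec l).filter (fun b => b > a) := by
        apply List.filter_congr
        intro b _
        by_cases hb : b > a <;> simp [hb]; omega
      simp [this, h]
    · simp only [if_neg h, ih t ht]
      have : (skyRec l).filter (fun b => decide (b > t) && decide (b > a))
           = (skyRec l).filter (fun b => b > t) := by
        apply List.filter_congr
        intro b _
        by_cases hb : b > t <;> simp [hb]; omega
      split
      · next hpos =>
        simp [this, show ¬ (a > t) from h]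
      · simp [this]

-- ===== VERDICT (by name: the statement is the Claim_ definition above) =====
theorem skylineHeights_spec : Claim_equal_skylineHeights := by
  intro arr _
  unfold Spec_skylineHeights skylineHeights
  rw [sky_main arr 0 le_rfl, alt_eq_skyRec]
  apply List.filter_eq_self.mpr
  intro b hb
  simpa using skyRec_pos arr b hb
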